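-- pv_equiv track=rewrite | github.com/pjhartout/stoei | stoei/slurm/parser.py | parse_sacct_output
-- ===== SOURCE A (Python) =====
-- MIN_SACCT_PARTS = 10  # JobID, Name, State, Restarts, Elapsed, ExitCode, NodeList, Submit, Start, End
--
-- def parse_sacct_output(raw_output: str) -> tuple[list[tuple[str, ...]], int, int, int]:
--     """Parse sacct output into job history data.
--
--     Args:
--         raw_output: Raw output from sacct command.
--
--     Returns:
--         Tuple of (jobs list, total jobs count, total requeues, max requeues).
--     """
--     lines = raw_output.strip().split("\n")
--     if len(lines) <= 1:  # Only header or empty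
--         return [], 0, 0, 0
--
--     jobs: list[tuple[str, ...]] = []
--     total_requeues = 0
--     max_requeues = 0
--
--     for line in lines[1:]:  # Skip header
--         parts = line.split("|")
--         if len(parts) >= MIN_SACCT_PARTS:
--             jobs.append(tuple(parts))
--             try:
--                 restart_count = int(parts[3])
--                 total_requeues += restart_count
--                 max_requeues = max(max_requeues, restart_count)
--             except (ValueError, IndexError):
--                 pass
--
--     total_jobs = len(jobs)
--
--     # Sort by JobID descending (most recent first)
--     def job_sort_key(job: tuple[str, ...]) -> int:
--         job_id = job[0].split("_")[0].strip()
--         try: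
--             return int(job_id)
--         except ValueError:
--             return 0
--
--     jobs.sort(key=job_sort_key, reverse=True)
--
--     return jobs, total_jobs, total_requeues, max_requeues
-- ===== SOURCE B (Python) =====
-- MIN_SACCT_PARTS = 10
--
--
-- def _job_sort_key(job):
--     try:
--         return int(job[0].split("_")[0].strip())
--     except ValueError:
--         return 0
--
--
-- def parse_sacct_output(raw_output):
--     # Online insertion sort over a back-to-front traversal of the data lines:
--     # each (earlier) job is inserted before the first kept job with key <= its
--     # key, so the list is always descending and stable; no final sort pass.
--     jobs = []
--     n = total = mx = 0
--     for line in reversed(raw_output.strip().split("\n")[1:]):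
--         parts = line.split("|")
--         if len(parts) < MIN_SACCT_PARTS:
--             continue
--         job = tuple(parts)
--         k = _job_sort_key(job)
--         i = 0
--         while i < len(jobs) and _job_sort_key(jobs[i]) > k:
--             i += 1
--         jobs.insert(i, job)
--         n += 1
--         try:
--             c = int(parts[3])
--         except ValueError:
--             continue
--         total += c
--         mx = max(c, mx)
--     return jobs, n, total, mx
-- ===== Notes on version B (the rewrite author's own statement) =====
-- stated objective: alternative
-- what changed: Replaces A's parse-then-sort design (accumulate jobs/sum/max left-to-right, then a final stable sort call) with an online insertion sort: the data lines are traversed back to front and each job is inserted into its place in an always-descending list, with count/total/max folded in the same reversed pass and no sort call at all.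
import Mathlib
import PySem

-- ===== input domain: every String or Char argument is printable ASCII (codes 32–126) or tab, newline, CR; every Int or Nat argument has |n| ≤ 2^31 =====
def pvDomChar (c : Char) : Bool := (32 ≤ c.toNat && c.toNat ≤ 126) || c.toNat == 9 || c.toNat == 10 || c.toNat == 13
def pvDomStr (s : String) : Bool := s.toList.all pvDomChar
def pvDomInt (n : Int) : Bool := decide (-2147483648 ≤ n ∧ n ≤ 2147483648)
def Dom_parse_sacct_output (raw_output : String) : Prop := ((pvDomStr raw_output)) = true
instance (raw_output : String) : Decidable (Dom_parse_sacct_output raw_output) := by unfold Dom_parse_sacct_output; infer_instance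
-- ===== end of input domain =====

-- B replaces A's parse-then-sort accumulator loop with an online insertion sort over a
-- back-to-front traversal of the data lines (no final sort pass); objective: alternative.


-- s.split(sep) for a NONEMPTY literal sep: Str.split? is none only for sep = "", unreachable here.
def pvSplit (s sep : String) : List String := (PySem.Str.split? s sep).getD []

-- shared helper: both Pythons' identical job_id key.
-- job[0] and split("_")[0] can never raise here (jobs have ≥ 10 parts; split is nonempty),
-- so the .getD ""/.headD "" defaults are unreachable; int(...) except ValueError → 0 is .getD 0.
def pvJobSortKey (job : List String) : Int :=
  let job_id := PySem.Str.strip ((pvSplit ((PySem.List.pyGet? job 0).getD "") "_").headD "")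
  (PySem.Int.ofStr? job_id).getD 0

-- ===== PORT A =====
def parse_sacct_output (raw_output : String) : List (List String) × Int × Int × Int :=
  let lines := pvSplit (PySem.Str.strip raw_output) "\n"
  if lines.length ≤ 1 then ([], 0, 0, 0)
  else
    -- for line in lines[1:]: accumulate (jobs, total_requeues, max_requeues)
    let st := (PySem.List.slice lines (some 1) none).foldl
      (fun (st : List (List String) × Int × Int) line =>
        let parts := pvSplit line "|"
        if parts.length ≥ 10 then
          let jobs := st.1 ++ [parts]
          -- try: int(parts[3]) … except (ValueError, IndexError): pass
          match PySem.List.pyGet? parts 3 with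
          | none => (jobs, st.2.1, st.2.2)
          | some s =>
            match PySem.Int.ofStr? s with
            | none => (jobs, st.2.1, st.2.2)
            | some c => (jobs, st.2.1 + c, max st.2.2 c)
        else st)
      (([] : List (List String)), (0 : Int), (0 : Int))
    (PySem.List.sorted st.1 pvJobSortKey true, (st.1.length : Int), st.2.1, st.2.2)

-- ===== PORT B =====
-- Source B's inner while: insert job before the first kept job whose key is ≤ k
def pvInsertDesc (k : Int) (job : List String) : List (List String) → List (List String)
  | [] => [job]
  | y :: ys => if pvJobSortKey y > k then y :: pvInsertDesc k job ys else job :: y :: ys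

def parse_sacct_output_alt (raw_output : String) : List (List String) × Int × Int × Int :=
  let lines := pvSplit (PySem.Str.strip raw_output) "\n"
  -- for line in reversed(lines[1:]): online insertion sort + running n/total/mx
  ((lines.drop 1).reverse).foldl
    (fun (st : List (List String) × Int × Int × Int) line =>
      let parts := pvSplit line "|"
      if parts.length < 10 then st
      else
        let k := pvJobSortKey parts
        let jobs := pvInsertDesc k parts st.1
        -- try: int(parts[3]) … except ValueError: continue  (parts[3] cannot raise: ≥ 10 parts)
        match PySem.Int.ofStr? ((PySem.List.pyGet? parts 3).getD "") with
        | none => (jobs, st.2.1 + 1, st.2.2.1, st.2.2.2)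
        | some c => (jobs, st.2.1 + 1, st.2.2.1 + c, max c st.2.2.2))
    (([] : List (List String)), (0 : Int), (0 : Int), (0 : Int))

-- ===== PRECONDITION & SPEC =====
def Spec_parse_sacct_output (raw_output : String) (out : List (List String) × Int × Int × Int) : Prop := out = parse_sacct_output_alt raw_output
instance (raw_output : String) (out : List (List String) × Int × Int × Int) : Decidable (Spec_parse_sacct_output raw_output out) := by unfold Spec_parse_sacct_output; infer_instance

-- ===== CLAIM (what is proved, stated in full; the proofs are below) =====
def Claim_equal_parse_sacct_output : Prop := ∀ (raw_output : String), Dom_parse_sacct_output raw_output → Spec_parse_sacct_output raw_output (parse_sacct_output raw_output)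

-- ===== LEMMAS AND PROOFS =====

-- A's loop body, named
def pvStep (st : List (List String) × Int × Int) (line : String) : List (List String) × Int × Int :=
  let parts := pvSplit line "|"
  if parts.length ≥ 10 then
    let jobs := st.1 ++ [parts]
    match PySem.List.pyGet? parts 3 with
    | none => (jobs, st.2.1, st.2.2)
    | some s =>
      match PySem.Int.ofStr? s with
      | none => (jobs, st.2.1, st.2.2)
      | some c => (jobs, st.2.1 + c, max st.2.2 c)
  else st

-- B's loop body, named
def pvBStep (st : List (List String) × Int × Int × Int) (line : String) : List (List String) × Int × Int × Int :=
  let parts := pvSplit line "|"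
  if parts.length < 10 then st
  else
    let k := pvJobSortKey parts
    let jobs := pvInsertDesc k parts st.1
    match PySem.Int.ofStr? ((PySem.List.pyGet? parts 3).getD "") with
    | none => (jobs, st.2.1 + 1, st.2.2.1, st.2.2.2)
    | some c => (jobs, st.2.1 + 1, st.2.2.1 + c, max c st.2.2.2)

def pvFJ (line : String) : Option (List String) :=
  let parts := pvSplit line "|"
  if parts.length ≥ 10 then some parts else none

def pvFC (line : String) : Option Int :=
  let parts := pvSplit line "|"
  if parts.length ≥ 10 then PySem.Int.ofStr? ((PySem.List.pyGet? parts 3).getD "") else none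

-- A's loop = append-filtered jobs, sum of counts, left max of counts
theorem pvLoop (L : List String) (j : List (List String)) (t m : Int) :
    L.foldl pvStep (j, t, m)
      = (j ++ L.filterMap pvFJ, t + (L.filterMap pvFC).sum, (L.filterMap pvFC).foldl max m) := by
  induction L generalizing j t m with
  | nil => simp
  | cons x xs ih =>
    simp only [List.foldl_cons, List.filterMap_cons]
    by_cases h : 10 ≤ (pvSplit x "|").length
    · rcases hg : PySem.List.pyGet? (pvSplit x "|") 3 with _ | s
      · have he : PySem.Int.ofStr? "" = none := by decide
        simp [pvStep, pvFJ, pvFC, if_pos h, hg, he, ih]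
      · rcases hi : PySem.Int.ofStr? s with _ | c
        · simp [pvStep, pvFJ, pvFC, if_pos h, hg, hi, ih]
        · simp [pvStep, pvFJ, pvFC, if_pos h, hg, hi, ih, add_assoc]
    · simp [pvStep, pvFJ, pvFC, if_neg h, ih]

-- abbreviation for the sorted-fold's insert (the rfl unfolding of PySem.List.sorted … true)
def pvInsL (acc : List (List String)) (x : List String) : List (List String) :=
  PySem.List.insertBy (fun a b => decide (pvJobSortKey b < pvJobSortKey a)) x acc

theorem pvInsL_nil (y : List String) : pvInsL [] y = [y] := rfl

theorem pvInsL_cons_pos (y z : List String) (l : List (List String))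
    (h : pvJobSortKey z < pvJobSortKey y) : pvInsL (z :: l) y = y :: z :: l := by
  simp [pvInsL, PySem.List.insertBy, h]

theorem pvInsL_cons_neg (y z : List String) (l : List (List String))
    (h : ¬ pvJobSortKey z < pvJobSortKey y) : pvInsL (z :: l) y = z :: pvInsL l y := by
  simp [pvInsL, PySem.List.insertBy, h]

-- the two inserts commute: inserting a LATER job y (strictly-before rule) past an
-- EARLIER job x (weakly-before rule) lands in the same place either way round
theorem pvComm (acc : List (List String)) (x y : List String) :
    pvInsL (pvInsertDesc (pvJobSortKey x) x acc) y
      = pvInsertDesc (pvJobSortKey x) x (pvInsL acc y) := by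
  induction acc with
  | nil =>
    rw [pvInsL_nil]
    by_cases hxy : pvJobSortKey x < pvJobSortKey y
    · rw [show pvInsertDesc (pvJobSortKey x) x [] = [x] from rfl,
        pvInsL_cons_pos _ _ _ hxy]
      simp [pvInsertDesc, hxy]
    · rw [show pvInsertDesc (pvJobSortKey x) x [] = [x] from rfl,
        pvInsL_cons_neg _ _ _ hxy]
      simp [pvInsertDesc, pvInsL, PySem.List.insertBy, hxy]
  | cons z rest ih =>
    by_cases hzx : pvJobSortKey x < pvJobSortKey z
    · rw [show pvInsertDesc (pvJobSortKey x) x (z :: rest)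
          = z :: pvInsertDesc (pvJobSortKey x) x rest from by simp [pvInsertDesc, hzx]]
      by_cases hzy : pvJobSortKey z < pvJobSortKey y
      · have hxy : pvJobSortKey x < pvJobSortKey y := lt_trans hzx hzy
        rw [pvInsL_cons_pos _ _ _ hzy, pvInsL_cons_pos _ _ _ hzy]
        simp [pvInsertDesc, hxy, hzx]
      · rw [pvInsL_cons_neg _ _ _ hzy, pvInsL_cons_neg _ _ _ hzy, ih]
        simp [pvInsertDesc, hzx]
    · rw [show pvInsertDesc (pvJobSortKey x) x (z :: rest) = x :: z :: rest from by
          simp [pvInsertDesc, hzx]]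
      by_cases hxy : pvJobSortKey x < pvJobSortKey y
      · have hzy : pvJobSortKey z < pvJobSortKey y := by omega
        rw [pvInsL_cons_pos _ _ _ hxy, pvInsL_cons_pos _ _ _ hzy]
        simp [pvInsertDesc, hxy, hzx]
      · rw [pvInsL_cons_neg _ _ _ hxy]
        by_cases hzy : pvJobSortKey z < pvJobSortKey y
        · rw [pvInsL_cons_pos _ _ _ hzy]
          simp [pvInsertDesc, hxy]
        · rw [pvInsL_cons_neg _ _ _ hzy]
          simp [pvInsertDesc, hzx]

theorem pvFoldlIns (m : List (List String)) (acc : List (List String)) (x : List String) :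
    m.foldl pvInsL (pvInsertDesc (pvJobSortKey x) x acc)
      = pvInsertDesc (pvJobSortKey x) x (m.foldl pvInsL acc) := by
  induction m generalizing acc with
  | nil => rfl
  | cons y m ih => simpa [pvComm] using ih (pvInsL acc y)

-- B's back-to-front insertion builds exactly Python's stable descending sort
theorem pvFoldrIns_eq_sorted (M : List (List String)) :
    M.foldr (fun x acc => pvInsertDesc (pvJobSortKey x) x acc) []
      = PySem.List.sorted M pvJobSortKey true := by
  have key : ∀ (N : List (List String)),
      N.foldr (fun x acc => pvInsertDesc (pvJobSortKey x) x acc) [] = N.foldl pvInsL [] := by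
    intro N
    induction N with
    | nil => rfl
    | cons x m ih =>
      simp only [List.foldr_cons, List.foldl_cons, ih]
      rw [show pvInsL [] x = pvInsertDesc (pvJobSortKey x) x [] from rfl, pvFoldlIns]
  rw [PySem.List.sorted_rev_eq_foldl_insertBy]
  exact key M

theorem pvFoldrAdd (C : List Int) : C.foldr (fun c t => t + c) 0 = C.sum := by
  induction C with
  | nil => rfl
  | cons c C ih => simp [ih, List.sum_cons]; omega

theorem pvFoldrMax (C : List Int) (a : Int) : C.foldr max a = C.foldl max a := by
  induction C generalizing a with
  | nil => rfl
  | cons c C ih =>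
    simp only [List.foldr_cons, List.foldl_cons, ih]
    have : ∀ (l : List Int) (p q : Int), l.foldl max (max p q) = max p (l.foldl max q) := by
      intro l
      induction l with
      | nil => intro p q; rfl
      | cons z l ihl =>
        intro p q
        simp only [List.foldl_cons, ← ihl]
        congr 1
        omega
    rw [← this C c a]
    congr 1
    omega

-- B's reversed fold, characterised over the raw line list
theorem pvBChar (L : List String) :
    L.foldr (fun line st => pvBStep st line) ([], 0, 0, 0)
      = (PySem.List.sorted (L.filterMap pvFJ) pvJobSortKey true,
         ((L.filterMap pvFJ).length : Int),
         (L.filterMap pvFC).sum,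
         (L.filterMap pvFC).foldl max 0) := by
  have main : L.foldr (fun line st => pvBStep st line) ([], 0, 0, 0)
      = ((L.filterMap pvFJ).foldr (fun x acc => pvInsertDesc (pvJobSortKey x) x acc) [],
         ((L.filterMap pvFJ).length : Int),
         (L.filterMap pvFC).foldr (fun c t => t + c) 0,
         (L.filterMap pvFC).foldr max 0) := by
    induction L with
    | nil => rfl
    | cons x xs ih =>
      simp only [List.foldr_cons, List.filterMap_cons, ih]
      by_cases h : 10 ≤ (pvSplit x "|").length
      · have h' : ¬ ((pvSplit x "|").length < 10) := by omega
        rcases hi : PySem.Int.ofStr? ((PySem.List.pyGet? (pvSplit x "|") 3).getD "") with _ | c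
        · simp [pvBStep, pvFJ, pvFC, h, h', hi]
        · simp [pvBStep, pvFJ, pvFC, h, h', hi]
      · have h' : (pvSplit x "|").length < 10 := by omega
        simp [pvBStep, pvFJ, pvFC, h, h']
  rw [main, pvFoldrIns_eq_sorted, pvFoldrAdd, pvFoldrMax]

theorem pvMain (raw_output : String) :
    parse_sacct_output raw_output = parse_sacct_output_alt raw_output := by
  unfold parse_sacct_output parse_sacct_output_alt
  simp only []
  generalize pvSplit (PySem.Str.strip raw_output) "\n" = L
  have hs : PySem.List.slice L (some 1) none = L.drop 1 := by
    rw [PySem.List.slice_from L (by omega : (0:Int) ≤ 1)]; rfl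
  have hB : ((L.drop 1).reverse).foldl
      (fun (st : List (List String) × Int × Int × Int) line => pvBStep st line)
      ([], 0, 0, 0)
      = (L.drop 1).foldr (fun line st => pvBStep st line) ([], 0, 0, 0) := by
    rw [List.foldl_reverse]
  show (if L.length ≤ 1 then (([] : List (List String)), (0:Int), (0:Int), (0:Int))
    else
      let st := (PySem.List.slice L (some 1) none).foldl pvStep ([], 0, 0)
      (PySem.List.sorted st.1 pvJobSortKey true, (st.1.length : Int), st.2.1, st.2.2))
    = ((L.drop 1).reverse).foldl (fun st line => pvBStep st line) ([], 0, 0, 0)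
  rw [hB, pvBChar, hs]
  by_cases h : L.length ≤ 1
  · have hd : L.drop 1 = [] := List.drop_eq_nil_of_le h
    simp [h, hd, PySem.List.sorted]
  · rw [if_neg h, pvLoop]
    simp

-- ===== VERDICT (by name: the statement is the Claim_ definition above) =====
theorem parse_sacct_output_spec : Claim_equal_parse_sacct_output := by
  intro raw_output _
  exact pvMain raw_output
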